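-- pv_equiv track=rewrite | github.com/Gsunshine/Enjoy-Hamburger | gan/HamGAN/space_filling_curves.py | enumerate_cells
-- ===== SOURCE A (Python) =====
-- from collections import defaultdict
--
-- def enumerate_cells(rows, cols):
--     # maps distances to cells
--     distances = defaultdict(list)
--
--     # maps numbers to cells
--     enumeration = {}
--
--     for i in range(rows):
--         for j in range(cols):
--             distance = i + j
--             distances[distance].append([i, j])
--
--     sorted_distances = sorted(list(distances.keys()))
--
--     numbers = list(range(rows * cols))
--     for distance in sorted_distances:
--         cells = distances[distance]
--         for cell in cells:
--             enumeration[numbers.pop(0)] = cell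
--     return enumeration
-- ===== SOURCE B (Python) =====
-- def enumerate_cells(rows, cols):
--     enumeration = {}
--     if rows <= 0 or cols <= 0:
--         return enumeration
--     n = 0
--     for d in range(rows + cols - 1):
--         for i in range(max(0, d - cols + 1), min(d, rows - 1) + 1):
--             enumeration[n] = [i, d - i]
--             n += 1
--     return enumeration
-- ===== Notes on version B (the rewrite author's own statement) =====
-- stated objective: faster
-- what changed: B computes the anti-diagonal enumeration directly with one counter and exact arithmetic i-range bounds per diagonal, eliminating A's group-by-distance defaultdict, the sorted() pass and the quadratic pop(0) numbering list.
import Mathlib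
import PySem

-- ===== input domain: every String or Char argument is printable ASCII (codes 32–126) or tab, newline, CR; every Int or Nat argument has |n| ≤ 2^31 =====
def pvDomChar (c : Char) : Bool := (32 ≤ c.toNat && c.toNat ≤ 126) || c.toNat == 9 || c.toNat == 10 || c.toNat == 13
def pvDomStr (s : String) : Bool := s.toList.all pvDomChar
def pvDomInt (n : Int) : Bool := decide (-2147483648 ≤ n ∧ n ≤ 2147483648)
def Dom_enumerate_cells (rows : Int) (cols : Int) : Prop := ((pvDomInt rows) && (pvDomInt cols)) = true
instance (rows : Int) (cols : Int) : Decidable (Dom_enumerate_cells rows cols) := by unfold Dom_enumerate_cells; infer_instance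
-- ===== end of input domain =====

-- B replaces A's group-by-distance dict + sorted() + quadratic pop(0) numbering with a direct
-- arithmetic enumeration of the anti-diagonals (objective: faster; same return value on all inputs).


-- ===== PORT A =====
-- distances[i+j].append([i,j]) over the grid, sorted keys, then pop numbers 0,1,2,… off the front.
-- numbers.pop(0) on an empty list would raise IndexError; that is unreachable (there are exactly
-- rows*cols cells), the port keeps the state unchanged in that dead branch.
def enumerate_cells (rows : Int) (cols : Int) : List (Int × List Int) :=
  let distances : PySem.Dict Int (List (List Int)) :=
    (PySem.List.pyRange 0 rows 1).foldl (fun dd i =>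
      (PySem.List.pyRange 0 cols 1).foldl (fun dd j =>
        dd.modify (i + j) [] (fun cs => cs ++ [[i, j]])) dd) PySem.Dict.empty
  let sorted_distances := PySem.List.sorted distances.keys (fun x => x)
  let numbers := PySem.List.pyRange 0 (rows * cols) 1
  let res := sorted_distances.foldl
    (fun (st : PySem.Dict Int (List Int) × List Int) dist =>
      (distances.getD dist []).foldl
        (fun (st : PySem.Dict Int (List Int) × List Int) cell =>
          match PySem.List.pop? st.2 0 with
          | none => st
          | some (n, rest) => (st.1.insert n cell, rest)) st)
    (PySem.Dict.empty, numbers)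
  res.1.items

-- ===== PORT B =====
def enumerate_cells_alt (rows : Int) (cols : Int) : List (Int × List Int) :=
  if rows ≤ 0 ∨ cols ≤ 0 then []
  else ((PySem.List.pyRange 0 (rows + cols - 1) 1).foldl
    (fun (st : PySem.Dict Int (List Int) × Int) d =>
      (PySem.List.pyRange (max 0 (d - cols + 1)) (min d (rows - 1) + 1) 1).foldl
        (fun (st : PySem.Dict Int (List Int) × Int) i =>
          (st.1.insert st.2 [i, d - i], st.2 + 1)) st)
    (PySem.Dict.empty, 0)).1.items

-- ===== PRECONDITION & SPEC =====
def Spec_enumerate_cells (rows : Int) (cols : Int) (out : List (Int × List Int)) : Prop := out = enumerate_cells_alt rows cols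
instance (rows : Int) (cols : Int) (out : List (Int × List Int)) : Decidable (Spec_enumerate_cells rows cols out) := by unfold Spec_enumerate_cells; infer_instance

-- ===== CLAIM (what is proved, stated in full; the proofs are below) =====
def Claim_equal_enumerate_cells : Prop := ∀ (rows : Int) (cols : Int), Dom_enumerate_cells rows cols → Spec_enumerate_cells rows cols (enumerate_cells rows cols)

-- ===== LEMMAS AND PROOFS =====

-- the list of (distance, cell) pairs A's double loop generates, in generation order
def pvRowPairs (cols i : Int) : List (Int × List Int) :=
  (PySem.List.pyRange 0 cols 1).map (fun j => (i + j, [i, j]))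
def pvPairs (rows cols : Int) : List (Int × List Int) :=
  (PySem.List.pyRange 0 rows 1).flatMap (pvRowPairs cols)
-- the cells of anti-diagonal d, i ascending (B's inner range)
def pvCells (rows cols d : Int) : List (List Int) :=
  (PySem.List.pyRange (max 0 (d - cols + 1)) (min d (rows - 1) + 1) 1).map (fun i => [i, d - i])
-- A's distances dict
def pvDistA (rows cols : Int) : PySem.Dict Int (List (List Int)) :=
  (PySem.List.pyRange 0 rows 1).foldl (fun dd i =>
    (PySem.List.pyRange 0 cols 1).foldl (fun dd j =>
      dd.modify (i + j) [] (fun cs => cs ++ [[i, j]])) dd) PySem.Dict.empty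
-- the loop bodies
def pvPopFn (st : PySem.Dict Int (List Int) × List Int) (cell : List Int) :
    PySem.Dict Int (List Int) × List Int :=
  match PySem.List.pop? st.2 0 with
  | none => st
  | some (n, rest) => (st.1.insert n cell, rest)
def pvInsFn (st : PySem.Dict Int (List Int) × Int) (cell : List Int) :
    PySem.Dict Int (List Int) × Int :=
  (st.1.insert st.2 cell, st.2 + 1)

theorem pvDistA_eq_foldl_pairs (rows cols : Int) :
    pvDistA rows cols =
      (pvPairs rows cols).foldl (fun dd p => dd.modify p.1 [] (fun cs => cs ++ [p.2]))
        PySem.Dict.empty := by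
  unfold pvDistA pvPairs pvRowPairs
  simp only [List.foldl_flatMap, List.foldl_map]

theorem pvDistA_getD (rows cols d : Int) :
    (pvDistA rows cols).getD d [] =
      ((pvPairs rows cols).filter (fun p => p.1 == d)).map (·.2) := by
  rw [pvDistA_eq_foldl_pairs, PySem.Dict.getD_foldl_modify_append, PySem.Dict.getD_empty]
  rfl

theorem pvFilter_pyRange (a b x : Int) :
    (PySem.List.pyRange a b 1).filter (fun j => j == x) =
      if a ≤ x ∧ x < b then [x] else [] := by
  rw [List.filter_beq]
  by_cases h : a ≤ x ∧ x < b
  · rw [List.count_eq_one_of_mem (PySem.List.nodup_pyRange_one a b)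
      (PySem.List.mem_pyRange_one.mpr h), if_pos h]
    rfl
  · rw [List.count_eq_zero_of_not_mem (fun hm => h (PySem.List.mem_pyRange_one.mp hm)), if_neg h]
    rfl

theorem pvRowPairs_filter (cols i d : Int) :
    (pvRowPairs cols i).filter (fun p => p.1 == d) =
      if i ≤ d ∧ d < i + cols then [(d, [i, d - i])] else [] := by
  unfold pvRowPairs
  rw [List.filter_map]
  rw [List.filter_congr (q := fun j => j == d - i)
    (by intro j _; show (i + j == d) = (j == d - i)
        by_cases h : j = d - i
        · simp [h]
        · simp [h]; omega)]
  rw [pvFilter_pyRange]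
  by_cases h : 0 ≤ d - i ∧ d - i < cols
  · rw [if_pos h, if_pos (by omega)]
    simp only [List.map_cons, List.map_nil]
    congr 2
    omega
  · rw [if_neg h, if_neg (by omega)]
    rfl

theorem pvFilter_pairs_eq_cells (R : Nat) (cols d : Int) (hd : 0 ≤ d) :
    ((pvPairs (R : Int) cols).filter (fun p => p.1 == d)).map (·.2) = pvCells (R : Int) cols d := by
  induction R with
  | zero =>
    have h1 : pvPairs ((0 : Nat) : Int) cols = [] := by
      unfold pvPairs
      rw [PySem.List.pyRange_one_eq_nil (by simp)]
      rfl
    rw [h1]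
    unfold pvCells
    rw [PySem.List.pyRange_one_eq_nil (by omega)]
    rfl
  | succ R ih =>
    have hcast : ((R + 1 : Nat) : Int) = (R : Int) + 1 := by push_cast; ring
    have hsplit : pvPairs ((R + 1 : Nat) : Int) cols = pvPairs (R : Int) cols ++ pvRowPairs cols (R : Int) := by
      unfold pvPairs
      rw [hcast, PySem.List.pyRange_one_succ_right (by positivity)]
      rw [List.flatMap_append, List.flatMap_cons, List.flatMap_nil, List.append_nil]
    rw [hsplit, List.filter_append, List.map_append, ih, pvRowPairs_filter, hcast]
    by_cases h1 : (R : Int) ≤ d ∧ d < (R : Int) + cols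
    · rw [if_pos h1]
      unfold pvCells
      have e1 : min d ((R : Int) + 1 - 1) + 1 = (R : Int) + 1 := by omega
      have e2 : min d ((R : Int) - 1) + 1 = (R : Int) := by omega
      rw [e1, e2, PySem.List.pyRange_one_succ_right (by omega)]
      simp
    · rw [if_neg h1, List.map_nil, List.append_nil]
      unfold pvCells
      by_cases h2 : d < (R : Int)
      · have e1 : min d ((R : Int) + 1 - 1) = min d ((R : Int) - 1) := by omega
        rw [e1]
      · rw [PySem.List.pyRange_one_eq_nil (by omega), PySem.List.pyRange_one_eq_nil (by omega)]

theorem pvMem_fst_pairs (rows cols x : Int) (hr : 1 ≤ rows) (hc : 1 ≤ cols) :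
    x ∈ (pvPairs rows cols).map (·.1) ↔ 0 ≤ x ∧ x < rows + cols - 1 := by
  unfold pvPairs pvRowPairs
  simp only [List.map_flatMap, List.map_map, List.mem_flatMap, List.mem_map,
    PySem.List.mem_pyRange_one, Function.comp]
  constructor
  · rintro ⟨i, hi, j, hj, rfl⟩
    omega
  · intro hx
    refine ⟨min x (rows - 1), by omega, x - min x (rows - 1), by omega, by omega⟩

theorem pvKeys_distA (rows cols : Int) :
    (pvDistA rows cols).keys = PySem.Set.ofList ((pvPairs rows cols).map (·.1)) := by
  rw [pvDistA_eq_foldl_pairs]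
  rw [PySem.Dict.keys_foldl_modify_key (pvPairs rows cols) Prod.fst []
    (fun dd p => fun cs => cs ++ [p.2]) PySem.Dict.empty]
  rw [PySem.Dict.keys_empty, PySem.Set.update_nil_left]

theorem pvSorted_keys (rows cols : Int) (hr : 1 ≤ rows) (hc : 1 ≤ cols) :
    PySem.List.sorted (pvDistA rows cols).keys (fun x => x) =
      PySem.List.pyRange 0 (rows + cols - 1) 1 := by
  apply PySem.List.sorted_eq_of_perm_of_pairwise_lt
  · rw [pvKeys_distA]
    rw [List.perm_ext_iff_of_nodup (PySem.List.nodup_pyRange_one 0 (rows + cols - 1))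
      (PySem.Set.nodup_ofList _)]
    intro x
    rw [PySem.Set.mem_ofList, PySem.List.mem_pyRange_one, pvMem_fst_pairs rows cols x hr hc]
  · exact PySem.List.pairwise_lt_pyRange_one 0 (rows + cols - 1)

theorem pvZip_map_fst (nums : List Int) (l : List (List Int)) :
    (nums.zip l).map (·.1) = nums.take l.length := by
  induction nums generalizing l with
  | nil => simp
  | cons n ns ih =>
    cases l with
    | nil => simp
    | cons c t => simp [ih]

theorem pvZip_append (l₁ l₂ : List (List Int)) : ∀ (nums : List Int),
    nums.zip (l₁ ++ l₂) = nums.zip l₁ ++ (nums.drop l₁.length).zip l₂ := by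
  induction l₁ with
  | nil => intro nums; simp
  | cons c t ih =>
    intro nums
    cases nums with
    | nil => simp
    | cons n ns => simp [ih]

theorem pvPopLoop (l : List (List Int)) : ∀ (e : PySem.Dict Int (List Int)) (nums : List Int),
    nums.Nodup → (∀ k ∈ e.keys, k ∉ nums) →
    l.foldl pvPopFn (e, nums) =
      (PySem.Dict.mk (e.items ++ nums.zip l), nums.drop l.length) := by
  induction l with
  | nil =>
    intro e nums _ _
    simp only [List.foldl_nil, List.zip_nil_right, List.append_nil, List.length_nil, List.drop_zero]
  | cons c t ih =>
    intro e nums hnd hdisj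
    cases nums with
    | nil =>
      have hstep : pvPopFn (e, []) c = (e, []) := by
        simp [pvPopFn, PySem.List.pop?]
      rw [List.foldl_cons, hstep, ih e [] hnd hdisj]
      simp
    | cons n rest =>
      have hcont : e.contains n = false := by
        rw [← Bool.not_eq_true, PySem.Dict.contains_iff_mem_keys]
        intro hmem
        exact hdisj n hmem (List.mem_cons_self)
      have hstep : pvPopFn (e, n :: rest) c = (e.insert n c, rest) := by
        simp [pvPopFn, PySem.List.pop?_zero_cons]
      rw [List.foldl_cons, hstep,
        ih (e.insert n c) rest (List.Nodup.of_cons hnd) ?_]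
      · rw [PySem.Dict.items_insert_of_not_contains e c hcont]
        simp [List.zip_cons_cons]
      · intro k hk
        rw [PySem.Dict.keys_insert_of_not_contains e c hcont] at hk
        rcases List.mem_append.mp hk with h | h
        · exact fun hr => hdisj k h (List.mem_cons_of_mem n hr)
        · simp only [List.mem_singleton] at h
          subst h
          exact (List.nodup_cons.mp hnd).1

theorem pvOuterA (cells : Int → List (List Int)) (ds : List Int) :
    ∀ (e : PySem.Dict Int (List Int)) (nums : List Int),
    nums.Nodup → (∀ k ∈ e.keys, k ∉ nums) →
    ds.foldl (fun st dist => (cells dist).foldl pvPopFn st) (e, nums) =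
      (PySem.Dict.mk (e.items ++ nums.zip (ds.flatMap cells)),
        nums.drop (ds.flatMap cells).length) := by
  induction ds with
  | nil =>
    intro e nums _ _
    simp
  | cons d t ih =>
    intro e nums hnd hdisj
    rw [List.foldl_cons, pvPopLoop (cells d) e nums hnd hdisj]
    have hkeys : (PySem.Dict.mk (e.items ++ nums.zip (cells d))).keys =
        e.keys ++ nums.take (cells d).length := by
      show (e.items ++ nums.zip (cells d)).map (·.1) = _
      rw [List.map_append, pvZip_map_fst]
      rfl
    rw [ih _ _ (List.Sublist.nodup (List.drop_sublist _ _) hnd) ?_]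
    · refine Prod.ext ?_ ?_
      · apply PySem.Dict.ext
        show e.items ++ nums.zip (cells d) ++ (nums.drop (cells d).length).zip (t.flatMap cells) =
          e.items ++ nums.zip ((d :: t).flatMap cells)
        rw [List.flatMap_cons, List.append_assoc, ← pvZip_append]
      · show (nums.drop (cells d).length).drop (t.flatMap cells).length =
          nums.drop ((d :: t).flatMap cells).length
        rw [List.drop_drop, List.flatMap_cons, List.length_append]
    · intro k hk
      rw [hkeys] at hk
      rcases List.mem_append.mp hk with h | h
      · exact fun hm => hdisj k h (List.mem_of_mem_drop hm)
      · exact fun hm => List.disjoint_take_drop hnd (le_refl _) h hm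

theorem pvInsLoop (l : List (List Int)) : ∀ (e : PySem.Dict Int (List Int)) (n : Int),
    (∀ k ∈ e.keys, k < n) →
    l.foldl pvInsFn (e, n) =
      (PySem.Dict.mk (e.items ++ PySem.List.enumerate l n), n + l.length) := by
  induction l with
  | nil =>
    intro e n _
    simp only [List.foldl_nil, PySem.List.enumerate_nil, List.append_nil, List.length_nil]
    refine Prod.ext ?_ (by simp)
    exact (PySem.Dict.ext rfl).symm
  | cons c t ih =>
    intro e n hlt
    have hcont : e.contains n = false := by
      rw [← Bool.not_eq_true, PySem.Dict.contains_iff_mem_keys]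
      intro hmem
      exact absurd (hlt n hmem) (by omega)
    have hstep : pvInsFn (e, n) c = (e.insert n c, n + 1) := rfl
    rw [List.foldl_cons, hstep, ih (e.insert n c) (n + 1) ?_]
    · rw [PySem.Dict.items_insert_of_not_contains e c hcont, PySem.List.enumerate_cons]
      refine Prod.ext (by simp) ?_
      simp only [List.length_cons]
      push_cast
      ring
    · intro k hk
      rw [PySem.Dict.keys_insert_of_not_contains e c hcont] at hk
      rcases List.mem_append.mp hk with h | h
      · have := hlt k h; omega
      · simp only [List.mem_singleton] at h; omega

theorem pvOuterB (cells : Int → List (List Int)) (ds : List Int) :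
    ∀ (e : PySem.Dict Int (List Int)) (n : Int),
    (∀ k ∈ e.keys, k < n) →
    ds.foldl (fun st d => (cells d).foldl pvInsFn st) (e, n) =
      (PySem.Dict.mk (e.items ++ PySem.List.enumerate (ds.flatMap cells) n),
        n + (ds.flatMap cells).length) := by
  induction ds with
  | nil =>
    intro e n _
    simp
  | cons d t ih =>
    intro e n hlt
    rw [List.foldl_cons, pvInsLoop (cells d) e n hlt]
    have hkeys : (PySem.Dict.mk (e.items ++ PySem.List.enumerate (cells d) n)).keys =
        e.keys ++ (PySem.List.enumerate (cells d) n).map (·.1) := by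
      show (e.items ++ PySem.List.enumerate (cells d) n).map (·.1) = _
      rw [List.map_append]
      rfl
    rw [ih _ _ ?_]
    · refine Prod.ext ?_ ?_
      · apply PySem.Dict.ext
        show e.items ++ PySem.List.enumerate (cells d) n ++
            PySem.List.enumerate (t.flatMap cells) (n + ↑(cells d).length) =
          e.items ++ PySem.List.enumerate ((d :: t).flatMap cells) n
        rw [List.flatMap_cons, List.append_assoc, ← PySem.List.enumerate_append]
      · show (n + ↑(cells d).length) + ↑(t.flatMap cells).length =
          n + ↑((d :: t).flatMap cells).length
        rw [List.flatMap_cons, List.length_append]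
        push_cast
        ring
    · intro k hk
      rw [hkeys] at hk
      rcases List.mem_append.mp hk with h | h
      · have := hlt k h
        have : (0:Int) ≤ (cells d).length := by positivity
        omega
      · rw [PySem.List.map_fst_enumerate] at h
        have := PySem.List.mem_pyRange_one.mp h
        omega

theorem pvZipEnum (l : List (List Int)) : ∀ (s N : Int), s + l.length ≤ N →
    (PySem.List.pyRange s N 1).zip l = PySem.List.enumerate l s := by
  induction l with
  | nil => intro s N _; simp [PySem.List.enumerate_nil]
  | cons c t ih =>
    intro s N h
    simp only [List.length_cons] at h
    rw [PySem.List.pyRange_one_cons (by push_cast at h ⊢; omega)]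
    rw [List.zip_cons_cons, PySem.List.enumerate_cons, ih (s + 1) N (by push_cast at h ⊢; omega)]

theorem pvLenPartition (ds : List Int) : ∀ (L : List (Int × List Int)), ds.Nodup →
    (∀ p ∈ L, p.1 ∈ ds) →
    (ds.flatMap (fun d => (L.filter (fun p => p.1 == d)).map (·.2))).length = L.length := by
  induction ds with
  | nil =>
    intro L _ hL
    have hLnil : L = [] := List.eq_nil_iff_forall_not_mem.mpr (fun p hp => absurd (hL p hp) (List.not_mem_nil))
    subst hLnil
    simp
  | cons d t ih =>
    intro L hnd hL
    rw [List.flatMap_cons, List.length_append, List.length_map]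
    have hd : d ∉ t := (List.nodup_cons.mp hnd).1
    have hfilter : ∀ d' ∈ t, L.filter (fun p => p.1 == d') =
        (L.filter (fun p => !(p.1 == d))).filter (fun p => p.1 == d') := by
      intro d' hd'
      rw [List.filter_filter]
      apply List.filter_congr
      intro p _
      by_cases h : p.1 = d'
      · have hne : d' ≠ d := fun hh => hd (hh ▸ hd')
        simp [h, hne]
      · simp [h]
    have hflat : t.flatMap (fun d' => (L.filter (fun p => p.1 == d')).map (·.2)) =
        t.flatMap (fun d' => ((L.filter (fun p => !(p.1 == d))).filter (fun p => p.1 == d')).map (·.2)) := by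
      rw [List.flatMap_def, List.flatMap_def]
      congr 1
      exact List.map_congr_left (fun d' hd' => by rw [hfilter d' hd'])
    rw [hflat, ih (L.filter (fun p => !(p.1 == d))) (List.nodup_cons.mp hnd).2 ?_]
    · exact (List.length_eq_length_filter_add (fun (p : Int × List Int) => p.1 == d)).symm
    · intro p hp
      rw [List.mem_filter] at hp
      have hmem := hL p hp.1
      have hne : p.1 ≠ d := by
        have := hp.2
        simp only [Bool.not_eq_eq_eq_not, Bool.not_true, beq_eq_false_iff_ne, ne_eq] at this
        exact this
      rcases List.mem_cons.mp hmem with h | h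
      · exact absurd h hne
      · exact h

theorem pvLenPairs (rows cols : Int) :
    (pvPairs rows cols).length = rows.toNat * cols.toNat := by
  unfold pvPairs pvRowPairs
  rw [List.length_flatMap]
  simp only [List.length_map, PySem.List.length_pyRange_one, Int.sub_zero]
  rw [List.map_const', List.sum_replicate_nat, PySem.List.length_pyRange_one, Int.sub_zero]

theorem pvMain (rows cols : Int) (hr : 1 ≤ rows) (hc : 1 ≤ cols) :
    enumerate_cells rows cols = enumerate_cells_alt rows cols := by
  obtain ⟨R, rfl⟩ : ∃ R : Nat, rows = (R : Int) :=
    ⟨rows.toNat, (Int.toNat_of_nonneg (by omega)).symm⟩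
  have hA : enumerate_cells (R : Int) cols =
      ((PySem.List.sorted (pvDistA (R : Int) cols).keys (fun x => x)).foldl
        (fun st dist => ((pvDistA (R : Int) cols).getD dist []).foldl pvPopFn st)
        (PySem.Dict.empty, PySem.List.pyRange 0 ((R : Int) * cols) 1)).1.items := rfl
  have hB : enumerate_cells_alt (R : Int) cols =
      ((PySem.List.pyRange 0 ((R : Int) + cols - 1) 1).foldl
        (fun st d => (pvCells (R : Int) cols d).foldl pvInsFn st)
        (PySem.Dict.empty, 0)).1.items := by
    unfold enumerate_cells_alt
    rw [if_neg (by omega : ¬((R : Int) ≤ 0 ∨ cols ≤ 0))]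
    rw [PySem.List.foldl_congr_mem _ _
      (fun (st : PySem.Dict Int (List Int) × Int) d => (pvCells (R : Int) cols d).foldl pvInsFn st) _
      (by
        intro st d _
        show _ = (pvCells (R : Int) cols d).foldl pvInsFn st
        unfold pvCells
        rw [List.foldl_map]
        rfl)]
  rw [hA, hB, pvSorted_keys _ _ hr hc]
  rw [pvOuterA (fun dist => (pvDistA (R : Int) cols).getD dist []) _ _ _
    (PySem.List.nodup_pyRange_one _ _) (by rw [PySem.Dict.keys_empty]; intro k hk; cases hk)]
  rw [pvOuterB (pvCells (R : Int) cols) _ _ _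
    (by rw [PySem.Dict.keys_empty]; intro k hk; cases hk)]
  have hflat : (PySem.List.pyRange 0 ((R : Int) + cols - 1) 1).flatMap
        (fun dist => (pvDistA (R : Int) cols).getD dist []) =
      (PySem.List.pyRange 0 ((R : Int) + cols - 1) 1).flatMap (pvCells (R : Int) cols) := by
    rw [List.flatMap_def, List.flatMap_def]
    congr 1
    apply List.map_congr_left
    intro d hd
    rw [pvDistA_getD, pvFilter_pairs_eq_cells R cols d (PySem.List.mem_pyRange_one.mp hd).1]
  have hlen1 : ((PySem.List.pyRange 0 ((R : Int) + cols - 1) 1).flatMap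
        (fun dist => (pvDistA (R : Int) cols).getD dist [])).length = (pvPairs (R : Int) cols).length := by
    have hgd : (PySem.List.pyRange 0 ((R : Int) + cols - 1) 1).flatMap
          (fun dist => (pvDistA (R : Int) cols).getD dist []) =
        (PySem.List.pyRange 0 ((R : Int) + cols - 1) 1).flatMap
          (fun d => ((pvPairs (R : Int) cols).filter (fun p => p.1 == d)).map (·.2)) := by
      rw [List.flatMap_def, List.flatMap_def]
      congr 1
      exact List.map_congr_left (fun d _ => by rw [pvDistA_getD])
    rw [hgd]
    refine pvLenPartition _ _ (PySem.List.nodup_pyRange_one _ _) ?_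
    intro p hp
    rw [PySem.List.mem_pyRange_one]
    exact (pvMem_fst_pairs (R : Int) cols p.1 hr hc).mp (List.mem_map_of_mem hp)
  have hlenC : (((PySem.List.pyRange 0 ((R : Int) + cols - 1) 1).flatMap (pvCells (R : Int) cols)).length : Int) =
      (R : Int) * cols := by
    rw [← hflat, hlen1, pvLenPairs]
    push_cast [Int.toNat_of_nonneg (show (0:Int) ≤ cols by omega)]
    simp
  rw [hflat, pvZipEnum _ 0 ((R : Int) * cols) (by omega)]

theorem pvDegenerate (rows cols : Int) (h : rows ≤ 0 ∨ cols ≤ 0) :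
    enumerate_cells rows cols = enumerate_cells_alt rows cols := by
  have hdist : pvDistA rows cols = PySem.Dict.empty := by
    unfold pvDistA
    rcases h with h | h
    · rw [PySem.List.pyRange_one_eq_nil h]
      rfl
    · rw [PySem.List.foldl_congr_mem _ _ (fun (dd : PySem.Dict Int (List (List Int))) i => dd) _
        (by intro dd i _; rw [PySem.List.pyRange_one_eq_nil h]; rfl)]
      rw [PySem.List.foldl_ignore]
  have hA : enumerate_cells rows cols =
      ((PySem.List.sorted (pvDistA rows cols).keys (fun x => x)).foldl
        (fun st dist => ((pvDistA rows cols).getD dist []).foldl pvPopFn st)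
        (PySem.Dict.empty, PySem.List.pyRange 0 (rows * cols) 1)).1.items := rfl
  have hAnil : enumerate_cells rows cols = [] := by
    rw [hA, hdist, PySem.Dict.keys_empty,
      (PySem.List.sorted_eq_nil_iff [] (fun x => x) false).mpr rfl]
    rfl
  have hBnil : enumerate_cells_alt rows cols = [] := by
    unfold enumerate_cells_alt
    rw [if_pos h]
  rw [hAnil, hBnil]

-- ===== VERDICT (by name: the statement is the Claim_ definition above) =====
theorem enumerate_cells_spec : Claim_equal_enumerate_cells := by
  intro rows cols _
  unfold Spec_enumerate_cells
  by_cases hr : 1 ≤ rows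
  · by_cases hc : 1 ≤ cols
    · exact pvMain rows cols hr hc
    · exact pvDegenerate rows cols (Or.inr (by omega))
  · exact pvDegenerate rows cols (Or.inl (by omega))
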